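-- pv_equiv track=rewrite | github.com/umang345/python-data-structures-and-algorithms | arrays/easy/1752. Check if Array Is Sorted and Rotated/approach.py | checkForSortedAndLessThanEqualToK
-- ===== SOURCE A (Python) =====
-- def checkForSortedAndLessThanEqualToK(indexToStart:int,nums:list[int], minElement:int) -> bool :
--     if indexToStart >= len(nums):
--         return True
--
--     if nums[indexToStart] > minElement:
--         return False
--
--     for index in range(indexToStart+1, len(nums)):
--         if nums[index]<nums[index-1] or nums[index]>minElement:
--             return False
--
--     return True
-- ===== SOURCE B (Python) =====
-- def checkForSortedAndLessThanEqualToK(indexToStart: int, nums: list[int], minElement: int) -> bool: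
--     if indexToStart >= len(nums):
--         return True
--     suffix = nums[indexToStart:]
--     return suffix == sorted(suffix) and max(suffix) <= minElement
-- ===== Notes on version B (the rewrite author's own statement) =====
-- stated objective: simpler
-- what changed: Replaces the fused early-exit index scan (adjacent comparison plus threshold per step) with a slice of the suffix checked by suffix == sorted(suffix) and a separate max(suffix) <= minElement pass.
-- outside the precondition, e.g. on checkForSortedAndLessThanEqualToK(-1, [1, 2], 10): A returns False, B returns True; on checkForSortedAndLessThanEqualToK(-3, [1, 2], 10): A raises IndexError, B returns True
import Mathlib
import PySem

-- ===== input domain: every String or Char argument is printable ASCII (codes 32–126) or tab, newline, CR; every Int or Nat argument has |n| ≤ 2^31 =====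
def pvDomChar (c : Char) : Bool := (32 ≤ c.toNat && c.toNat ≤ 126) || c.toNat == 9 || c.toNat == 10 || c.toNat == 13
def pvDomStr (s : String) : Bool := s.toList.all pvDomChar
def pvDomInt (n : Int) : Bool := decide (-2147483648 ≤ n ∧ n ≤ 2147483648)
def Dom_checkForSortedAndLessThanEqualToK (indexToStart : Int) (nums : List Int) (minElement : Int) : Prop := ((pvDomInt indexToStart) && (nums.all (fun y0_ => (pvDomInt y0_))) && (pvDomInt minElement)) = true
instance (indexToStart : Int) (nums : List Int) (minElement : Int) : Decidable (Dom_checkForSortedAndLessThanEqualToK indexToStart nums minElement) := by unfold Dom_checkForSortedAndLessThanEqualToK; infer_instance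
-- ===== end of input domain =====

-- B replaces A's fused early-exit index scan with a slice of the suffix, a sorted-equality
-- check and a separate max pass (objective: simpler).


-- ===== PORT A =====
-- the 'for index in range(indexToStart+1, len(nums))' loop with its early 'return False'
def aScan (nums : List Int) (minElement : Int) (index : Int) : Bool :=
  if _h : index < (nums.length : Int) then
    if PySem.List.pyGetD nums index 0 < PySem.List.pyGetD nums (index - 1) 0
        || minElement < PySem.List.pyGetD nums index 0 then false
    else aScan nums minElement (index + 1)
  else true
termination_by ((nums.length : Int) - index).toNat
decreasing_by omega

def checkForSortedAndLessThanEqualToK (indexToStart : Int) (nums : List Int) (minElement : Int) : Bool :=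
  if (nums.length : Int) ≤ indexToStart then true
  else
    match PySem.List.pyGet? nums indexToStart with
    | none => false   -- nums[indexToStart] raises IndexError; excluded by Pre_
    | some v => if minElement < v then false else aScan nums minElement (indexToStart + 1)

-- ===== PORT B =====
def checkForSortedAndLessThanEqualToK_alt (indexToStart : Int) (nums : List Int) (minElement : Int) : Bool :=
  if (nums.length : Int) ≤ indexToStart then true
  else
    let suffix := PySem.List.slice nums (some indexToStart) none
    match PySem.List.max? suffix (fun x => x) with
    | none => false   -- max([]) raises ValueError; the guard keeps the suffix nonempty for indexToStart ≥ 0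
    | some mx =>
        decide (suffix = PySem.List.sorted suffix (fun x => x) false) && decide (mx ≤ minElement)

-- ===== PRECONDITION & SPEC =====
-- Pre_ restricts to the function's natural domain indexToStart ≥ 0: on negative indexToStart A
-- raises IndexError (indexToStart < -len) or applies Python's negative-index/range wraparound,
-- comparing elements across the array boundary — an accident of indexing B does not reproduce.
def Pre_checkForSortedAndLessThanEqualToK (indexToStart : Int) (nums : List Int) (minElement : Int) : Prop := 0 ≤ indexToStart
instance (indexToStart : Int) (nums : List Int) (minElement : Int) : Decidable (Pre_checkForSortedAndLessThanEqualToK indexToStart nums minElement) := by unfold Pre_checkForSortedAndLessThanEqualToK; infer_instance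
def pvWitness_checkForSortedAndLessThanEqualToK : Int × List Int × Int := (0, [1, 2], 5)

def Spec_checkForSortedAndLessThanEqualToK (indexToStart : Int) (nums : List Int) (minElement : Int) (out : Bool) : Prop := out = checkForSortedAndLessThanEqualToK_alt indexToStart nums minElement
instance (indexToStart : Int) (nums : List Int) (minElement : Int) (out : Bool) : Decidable (Spec_checkForSortedAndLessThanEqualToK indexToStart nums minElement out) := by unfold Spec_checkForSortedAndLessThanEqualToK; infer_instance

-- ===== CLAIM (what is proved, stated in full; the proofs are below) =====
def Claim_equal_checkForSortedAndLessThanEqualToK : Prop := ∀ (indexToStart : Int) (nums : List Int) (minElement : Int), Dom_checkForSortedAndLessThanEqualToK indexToStart nums minElement → Pre_checkForSortedAndLessThanEqualToK indexToStart nums minElement → Spec_checkForSortedAndLessThanEqualToK indexToStart nums minElement (checkForSortedAndLessThanEqualToK indexToStart nums minElement)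

-- ===== LEMMAS AND PROOFS =====

-- common target: the suffix nums.drop k is non-decreasing and all its elements are ≤ m
def target (nums : List Int) (m : Int) (k : Nat) : Bool :=
  decide (List.IsChain (· ≤ ·) (nums.drop k)) && (nums.drop k).all (fun x => decide (x ≤ m))


theorem aScan_eq (nums : List Int) (m : Int) (k : Nat) (hk : k < nums.length) :
    ((if m < nums[k] then false else aScan nums m ((k : Int) + 1)) = target nums m k) := by
  have hdk : nums.drop k = nums[k] :: nums.drop (k + 1) := List.drop_eq_getElem_cons hk
  by_cases h : k + 1 < nums.length
  · have ih := aScan_eq nums m (k + 1) h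
    have hdk1 : nums.drop (k + 1) = nums[k + 1] :: nums.drop (k + 2) := List.drop_eq_getElem_cons h
    rw [aScan, dif_pos (show ((k : Int) + 1) < (nums.length : Int) by exact_mod_cast h)]
    have e : ((k : Int) + 1) = ((k + 1 : Nat) : Int) := by push_cast; ring
    have e2 : ((k + 1 : Nat) : Int) - 1 = ((k : Nat) : Int) := by push_cast; ring
    rw [e, e2, PySem.List.pyGetD_ofNat nums (k + 1) 0 h, PySem.List.pyGetD_ofNat nums k 0 hk]
    unfold target at ih ⊢
    rw [hdk, hdk1]
    rw [hdk1] at ih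
    generalize nums[k] = a at *
    generalize nums[k + 1] = b at *
    generalize nums.drop (k + 2) = t at *
    by_cases h2 : b < a
    · simp [List.isChain_cons_cons, h2, show ¬ (a ≤ b) from by omega]
    · by_cases h3 : m < b
      · simp [List.isChain_cons_cons, h2, h3, show ¬ (b ≤ m) from by omega]
      · rw [if_neg h3] at ih
        by_cases h1 : m < a
        · simp [List.isChain_cons_cons, h1, show ¬ (a ≤ m) from by omega]
        · have hcond : (decide (b < a) || decide (m < b)) = false := by simp [h2, h3]
          rw [if_neg h1, hcond]
          simp only [Bool.false_eq_true, if_false]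
          rw [ih]
          simp [List.isChain_cons_cons,
            show a ≤ b from by omega, show a ≤ m from by omega]
  · have hdk1 : nums.drop (k + 1) = [] := List.drop_eq_nil_of_le (by omega)
    rw [aScan,
      dif_neg (show ¬ ((k : Int) + 1 < (nums.length : Int)) by exact_mod_cast (by omega))]
    unfold target
    rw [hdk, hdk1]
    generalize nums[k] = a at *
    by_cases h1 : m < a
    · simp [h1, show ¬ (a ≤ m) from by omega]
    · simp [h1, show a ≤ m from by omega]
termination_by nums.length - k

theorem A_eq (i : Int) (nums : List Int) (m : Int) (h0 : 0 ≤ i) (h1 : i < (nums.length : Int)) :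
    checkForSortedAndLessThanEqualToK i nums m = target nums m i.toNat := by
  have hk : i.toNat < nums.length := by omega
  unfold checkForSortedAndLessThanEqualToK
  rw [if_neg (by omega), PySem.List.pyGet?_eq_some_getElem nums h0 h1]
  have e : i + 1 = ((i.toNat : Nat) : Int) + 1 := by omega
  simp only [e]
  exact aScan_eq nums m i.toNat hk

theorem sorted_fix_iff (s : List Int) :
    (s = PySem.List.sorted s (fun x => x) false) ↔ List.IsChain (· ≤ ·) s := by
  rw [List.isChain_iff_pairwise]
  constructor
  · intro h
    have hp := PySem.List.sorted_pairwise s (fun x => x)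
    rw [← h] at hp
    exact hp
  · intro h
    exact (PySem.List.sorted_eq_self_of_pairwise s (fun x => x) h).symm

theorem pyMaxLe_iff (s : List Int) (mx m : Int)
    (h : PySem.List.max? s (fun x => x) = some mx) : mx ≤ m ↔ ∀ x ∈ s, x ≤ m := by
  constructor
  · intro hm x hx
    exact le_trans (PySem.List.max?_isMax h x hx) hm
  · intro hall
    exact hall mx (PySem.List.max?_mem h)

theorem B_eq (i : Int) (nums : List Int) (m : Int) (h0 : 0 ≤ i) (h1 : i < (nums.length : Int)) :
    checkForSortedAndLessThanEqualToK_alt i nums m = target nums m i.toNat := by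
  have hk : i.toNat < nums.length := by omega
  obtain ⟨a, t, hat⟩ : ∃ a t, nums.drop i.toNat = a :: t :=
    ⟨nums[i.toNat], nums.drop (i.toNat + 1), List.drop_eq_getElem_cons hk⟩
  unfold checkForSortedAndLessThanEqualToK_alt target
  rw [if_neg (by omega)]
  simp only [PySem.List.slice_from nums h0, hat, PySem.List.max?_id_cons]
  rw [Bool.eq_iff_iff]
  simp [sorted_fix_iff, pyMaxLe_iff (a :: t) (t.foldl max a) m (PySem.List.max?_id_cons a t),
    List.all_eq_true]

-- ===== VERDICT (by name: the statement is the Claim_ definition above) =====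
theorem checkForSortedAndLessThanEqualToK_spec : Claim_equal_checkForSortedAndLessThanEqualToK := by
  intro i nums m _ hpre
  unfold Spec_checkForSortedAndLessThanEqualToK
  by_cases h : (nums.length : Int) ≤ i
  · simp [checkForSortedAndLessThanEqualToK, checkForSortedAndLessThanEqualToK_alt, h]
  · rw [A_eq i nums m hpre (by omega), B_eq i nums m hpre (by omega)]
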